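-- pv_equiv track=rewrite | github.com/Cameron-Grey-Kunstadt/Deduper-Cameron-Grey-Kunstadt | deduper.py | plus_softclip_adjustment
-- ===== SOURCE A (Python) =====
-- def plus_softclip_adjustment(cigar):
--     '''Calculates the needed softclip adjustment from cigar string, for + strand'''
--     clip_num = ""
--     for letter in cigar:
--         if letter == 'S':
--             return int(clip_num)
--         elif letter == 'M':
--             return 0
--         else:
--             clip_num += letter
--     return int(clip_num)
-- ===== SOURCE B (Python) =====
-- def plus_softclip_adjustment(cigar):
--     '''Calculates the needed softclip adjustment from cigar string, for + strand'''
--     s = cigar.find('S')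
--     m = cigar.find('M')
--     if m != -1 and (s == -1 or m < s):
--         return 0
--     return int(cigar if s == -1 else cigar[:s])
-- ===== Notes on version B (the rewrite author's own statement) =====
-- stated objective: idiomatic
-- what changed: Replaced the character-by-character accumulation loop with two str.find calls locating the first 'S' and 'M', a comparison deciding which comes first, and int() on the slice before the 'S' (or the whole string).
import Mathlib
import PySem

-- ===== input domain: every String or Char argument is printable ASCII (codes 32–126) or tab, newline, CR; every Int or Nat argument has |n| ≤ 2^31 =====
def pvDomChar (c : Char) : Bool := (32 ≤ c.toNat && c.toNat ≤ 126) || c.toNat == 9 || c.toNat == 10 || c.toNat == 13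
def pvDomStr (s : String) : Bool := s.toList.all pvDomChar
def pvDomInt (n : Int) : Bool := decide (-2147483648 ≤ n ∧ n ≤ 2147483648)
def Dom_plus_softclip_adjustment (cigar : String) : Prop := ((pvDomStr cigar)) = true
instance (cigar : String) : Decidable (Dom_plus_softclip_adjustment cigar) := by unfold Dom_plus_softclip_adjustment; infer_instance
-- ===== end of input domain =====

-- B replaces A's accumulation loop by two str.find calls and one slice (idiomatic, same cost).

-- ===== PORT A =====
-- the for-loop with its growing clip_num accumulator; int() that would raise is covered by Pre_ below
def pvGoA : List Char → List Char → Int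
  | [], clip_num => (PySem.Int.ofChars? clip_num).getD 0
  | letter :: rest, clip_num =>
    if letter = 'S' then (PySem.Int.ofChars? clip_num).getD 0
    else if letter = 'M' then 0
    else pvGoA rest (clip_num ++ [letter])

def plus_softclip_adjustment (cigar : String) : Int := pvGoA cigar.toList []

-- ===== PORT B =====
def plus_softclip_adjustment_alt (cigar : String) : Int :=
  let s := PySem.Str.find cigar "S"
  let m := PySem.Str.find cigar "M"
  if m ≠ -1 ∧ (s = -1 ∨ m < s) then 0
  else (PySem.Int.ofStr? (if s = -1 then cigar else PySem.Str.slice cigar none (some s))).getD 0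

-- ===== PRECONDITION & SPEC =====
-- pvQ c = "c is not one of the special operators S/M" (used only to state Pre_)
def pvQ (c : Char) : Bool := !(c == 'S' || c == 'M')

-- Pre_ excludes exactly the inputs where A's int() raises ValueError: unless the first S/M
-- operator is 'M', the prefix before it (or the whole string) must parse as a Python int.
def Pre_plus_softclip_adjustment (cigar : String) : Prop :=
  (cigar.toList.dropWhile pvQ).head? = some 'M' ∨
    (PySem.Int.ofChars? (cigar.toList.takeWhile pvQ)).isSome = true
instance (cigar : String) : Decidable (Pre_plus_softclip_adjustment cigar) := by
  unfold Pre_plus_softclip_adjustment; infer_instance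

def pvWitness_plus_softclip_adjustment : String := "3S2M"

def Spec_plus_softclip_adjustment (cigar : String) (out : Int) : Prop := out = plus_softclip_adjustment_alt cigar
instance (cigar : String) (out : Int) : Decidable (Spec_plus_softclip_adjustment cigar out) := by unfold Spec_plus_softclip_adjustment; infer_instance

-- ===== CLAIM (what is proved, stated in full; the proofs are below) =====
def Claim_equal_plus_softclip_adjustment : Prop := ∀ (cigar : String), Dom_plus_softclip_adjustment cigar → Pre_plus_softclip_adjustment cigar → Spec_plus_softclip_adjustment cigar (plus_softclip_adjustment cigar)

-- ===== LEMMAS AND PROOFS =====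

-- the common normal form both ports reach
def pvF (l : List Char) : Int :=
  if (l.dropWhile pvQ).head? = some 'M' then 0
  else (PySem.Int.ofChars? (l.takeWhile pvQ)).getD 0

theorem pvGoA_eq (l : List Char) : ∀ acc,
    pvGoA l acc =
      if (l.dropWhile pvQ).head? = some 'M' then 0
      else (PySem.Int.ofChars? (acc ++ l.takeWhile pvQ)).getD 0 := by
  induction l with
  | nil => intro acc; simp [pvGoA]
  | cons c rest ih =>
    intro acc
    by_cases hS : c = 'S'
    · subst hS; simp [pvGoA, List.dropWhile, pvQ]
    · by_cases hM : c = 'M'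
      · subst hM; simp [pvGoA, List.dropWhile, pvQ]
      · have hQ : pvQ c = true := by simp [pvQ, hS, hM]
        simp only [pvGoA, if_neg hS, if_neg hM, List.dropWhile_cons, hQ, if_pos,
          List.takeWhile_cons, ih]
        simp

theorem pvA_eq_F (cigar : String) : plus_softclip_adjustment cigar = pvF cigar.toList := by
  simp [plus_softclip_adjustment, pvGoA_eq, pvF]

theorem pv_single_prefix (c : Char) (xs : List Char) : [c] <+: xs ↔ xs[0]? = some c := by
  cases xs with
  | nil => simp
  | cons a t => simp [List.cons_prefix_cons, eq_comm]

theorem pv_single_prefix_drop (c : Char) (l : List Char) (i : Nat) :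
    [c] <+: l.drop i ↔ l[i]? = some c := by
  rw [pv_single_prefix]
  simp [List.getElem?_drop]

theorem pv_single_infix (c : Char) (l : List Char) : [c] <:+: l ↔ c ∈ l := by
  constructor
  · intro h; exact h.sublist.subset (List.mem_singleton_self c)
  · intro h
    obtain ⟨s, t, rfl⟩ := List.append_of_mem h
    exact ⟨s, t, by simp⟩

-- find of a single character: first index with that character
theorem pv_find_single (c : Char) (l : List Char) (h : c ∈ l) :
    0 ≤ PySem.Chars.find l [c] ∧
    l[(PySem.Chars.find l [c]).toNat]? = some c ∧
    ∀ i < (PySem.Chars.find l [c]).toNat, l[i]? ≠ some c := by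
  have hinf : [c] <:+: l := (pv_single_infix c l).mpr h
  have hnn : 0 ≤ PySem.Chars.find l [c] := (PySem.Chars.find_nonneg_iff l [c]).mpr hinf
  obtain ⟨h1, h2⟩ := PySem.Chars.find_spec (s := l) (sub := [c]) hnn
  refine ⟨hnn, (pv_single_prefix_drop c l _).mp h1, fun i hi hc => ?_⟩
  exact h2 i hi ((pv_single_prefix_drop c l i).mpr hc)

theorem pv_find_neg (c : Char) (l : List Char) (h : c ∉ l) :
    PySem.Chars.find l [c] = -1 := by
  exact (PySem.Chars.find_eq_neg_one_iff l [c]).mpr (fun hinf => h ((pv_single_infix c l).mp hinf))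

-- elements of takeWhile pvQ are neither 'S' nor 'M'
theorem pv_pre_not_special (l : List Char) (i : Nat) (hi : i < (l.takeWhile pvQ).length)
    (c : Char) (hc : l[i]? = some c) : c ≠ 'S' ∧ c ≠ 'M' := by
  have hpre : l.takeWhile pvQ <+: l := List.takeWhile_prefix pvQ
  have : (l.takeWhile pvQ)[i]? = some c := by
    obtain ⟨t, ht⟩ := hpre
    rw [← ht, List.getElem?_append_left hi] at hc
    exact hc
  have hmem : c ∈ l.takeWhile pvQ := List.mem_of_getElem? this
  have hq : pvQ c = true := List.mem_takeWhile_imp hmem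
  simp [pvQ] at hq
  exact ⟨hq.1, hq.2⟩

-- the element right after the takeWhile prefix is the head of the dropWhile
theorem pv_getElem_at_k (l : List Char) :
    l[(l.takeWhile pvQ).length]? = (l.dropWhile pvQ).head? := by
  have hsplit : l.takeWhile pvQ ++ l.dropWhile pvQ = l := List.takeWhile_append_dropWhile
  obtain ⟨k, hk⟩ : ∃ k, (l.takeWhile pvQ).length = k := ⟨_, rfl⟩
  rw [hk, ← hsplit, List.getElem?_append_right (by omega)]
  simp [List.head?_eq_getElem?, hk]

theorem pv_take_takeWhile (p : Char → Bool) (l : List Char) :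
    l.take (l.takeWhile p).length = l.takeWhile p := by
  obtain ⟨t, ht⟩ := List.takeWhile_prefix (l := l) (p := p)
  have h2 := List.take_left (l₁ := l.takeWhile p) (l₂ := t)
  rw [ht] at h2
  exact h2

theorem pv_head_dropWhile (p : Char → Bool) (l : List Char) (c : Char)
    (h : (l.dropWhile p).head? = some c) : p c = false := by
  induction l with
  | nil => simp at h
  | cons a t ih =>
    by_cases hp : p a = true
    · rw [List.dropWhile_cons_of_pos hp] at h; exact ih h
    · rw [List.dropWhile_cons_of_neg hp] at h
      simp at h
      subst h
      simpa using hp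

theorem pvB_eq_F (cigar : String) : plus_softclip_adjustment_alt cigar = pvF cigar.toList := by
  have hSl : ("S" : String).toList = ['S'] := rfl
  have hMl : ("M" : String).toList = ['M'] := rfl
  unfold plus_softclip_adjustment_alt pvF
  simp only [PySem.Str.find_eq, hSl, hMl]
  set l := cigar.toList with hl
  set k := (l.takeWhile pvQ).length with hk
  have hnotspec := pv_pre_not_special l
  cases hh : (l.dropWhile pvQ).head? with
  | none =>
    have hdw : l.dropWhile pvQ = [] := List.head?_eq_none_iff.mp hh
    have htw : l.takeWhile pvQ = l := by
      have h2 := List.takeWhile_append_dropWhile (p := pvQ) (l := l)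
      rw [hdw, List.append_nil] at h2
      exact h2
    have hSnot : 'S' ∉ l := by
      intro hm
      rw [← htw] at hm
      have := List.mem_takeWhile_imp hm
      simp [pvQ] at this
    have hMnot : 'M' ∉ l := by
      intro hm
      rw [← htw] at hm
      have := List.mem_takeWhile_imp hm
      simp [pvQ] at this
    rw [pv_find_neg _ _ hSnot, pv_find_neg _ _ hMnot]
    simp [PySem.Int.ofStr?, ← hl, htw]
  | some c =>
    have hck : l[k]? = some c := by rw [hk, pv_getElem_at_k l, hh]
    have hcmem : c ∈ l := List.mem_of_getElem? hck
    have hQc : pvQ c = false := pv_head_dropWhile pvQ l c hh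
    have hcSM : c = 'S' ∨ c = 'M' := by
      by_contra hcon
      push Not at hcon
      simp [pvQ, hcon.1, hcon.2] at hQc
    rcases hcSM with hcS | hcM
    · -- first operator is 'S'
      subst hcS
      obtain ⟨hs0, hsat, hsmin⟩ := pv_find_single 'S' l hcmem
      have hsk : (PySem.Chars.find l ['S']).toNat = k := by
        by_contra hne
        rcases Nat.lt_or_ge (PySem.Chars.find l ['S']).toNat k with hlt | hge
        · exact ((hnotspec _ hlt 'S' hsat).1) rfl
        · exact hsmin k (by omega) hck
      have hcond : ¬ (PySem.Chars.find l ['M'] ≠ -1 ∧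
          (PySem.Chars.find l ['S'] = -1 ∨ PySem.Chars.find l ['M'] < PySem.Chars.find l ['S'])) := by
        rintro ⟨hm1, hor⟩
        have hMmem : 'M' ∈ l := by
          have := (PySem.Chars.find_ne_neg_one_iff l ['M']).mp hm1
          exact (pv_single_infix 'M' l).mp this
        obtain ⟨hm0, hmat, hmmin⟩ := pv_find_single 'M' l hMmem
        have hmgt : k < (PySem.Chars.find l ['M']).toNat := by
          rcases Nat.lt_trichotomy (PySem.Chars.find l ['M']).toNat k with h1 | h1 | h1
          · exact absurd rfl ((hnotspec _ h1 'M' hmat).2)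
          · rw [h1] at hmat
            rw [hmat] at hck
            simp at hck
          · exact h1
        rcases hor with h2 | h2
        · omega
        · have := Int.toNat_of_nonneg hm0
          have := Int.toNat_of_nonneg hs0
          omega
      rw [if_neg hcond]
      have hsne : ¬ PySem.Chars.find l ['S'] = -1 := by omega
      rw [if_neg hsne]
      have hslice : (PySem.Str.slice cigar none (some (PySem.Chars.find l ['S']))).toList
          = l.takeWhile pvQ := by
        simp only [PySem.Str.slice, ← hl, String.toList_ofList,
          PySem.Chars.slice_eq_listSlice, PySem.List.slice_to _ hs0, hsk]
        rw [hk]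
        exact pv_take_takeWhile pvQ l
      simp [PySem.Int.ofStr?, hslice]
    · -- first operator is 'M'
      subst hcM
      obtain ⟨hm0, hmat, hmmin⟩ := pv_find_single 'M' l hcmem
      have hmk : (PySem.Chars.find l ['M']).toNat ≤ k := by
        by_contra hgt
        exact hmmin k (by omega) hck
      have hcond : PySem.Chars.find l ['M'] ≠ -1 ∧
          (PySem.Chars.find l ['S'] = -1 ∨ PySem.Chars.find l ['M'] < PySem.Chars.find l ['S']) := by
        constructor
        · omega
        · by_cases hS : 'S' ∈ l
          · obtain ⟨hs0, hsat, hsmin⟩ := pv_find_single 'S' l hS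
            have hsgt : k < (PySem.Chars.find l ['S']).toNat := by
              rcases Nat.lt_trichotomy (PySem.Chars.find l ['S']).toNat k with h1 | h1 | h1
              · exact absurd rfl ((hnotspec _ h1 'S' hsat).1)
              · rw [h1] at hsat
                rw [hsat] at hck
                simp at hck
              · exact h1
            right
            have := Int.toNat_of_nonneg hm0
            have := Int.toNat_of_nonneg hs0
            omega
          · exact Or.inl (pv_find_neg 'S' l hS)
      rw [if_pos hcond]
      simp

-- ===== VERDICT (by name: the statement is the Claim_ definition above) =====
theorem plus_softclip_adjustment_spec : Claim_equal_plus_softclip_adjustment := by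
  intro cigar _ _
  unfold Spec_plus_softclip_adjustment
  rw [pvA_eq_F, pvB_eq_F]
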